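-- pv_equiv track=rewrite | github.com/pggggggggh/Problem-Solving | 백준/Gold/13809. Champernowne Constant/Champernowne Constant.py | f
-- ===== SOURCE A (Python) =====
-- def f(x):
--     add = 9
--     res = 0
--     for i in range(1, len(str(x))):
--         res += i * add
--         add *= 10
--     res += len(str(x)) * (x - 10 ** (len(str(x)) - 1) + 1)
--
--     return res
-- ===== SOURCE B (Python) =====
-- def f(x):
--     d = len(str(x))
--     return d * (x + 1) - (10 ** d - 1) // 9
-- ===== Notes on version B (the rewrite author's own statement) =====
-- stated objective: simpler
-- what changed: Replaced the digit-length loop accumulating i*9*10^(i-1) with the closed-form d*(x+1) - (10**d - 1)//9 via the repunit identity.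
import Mathlib
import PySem

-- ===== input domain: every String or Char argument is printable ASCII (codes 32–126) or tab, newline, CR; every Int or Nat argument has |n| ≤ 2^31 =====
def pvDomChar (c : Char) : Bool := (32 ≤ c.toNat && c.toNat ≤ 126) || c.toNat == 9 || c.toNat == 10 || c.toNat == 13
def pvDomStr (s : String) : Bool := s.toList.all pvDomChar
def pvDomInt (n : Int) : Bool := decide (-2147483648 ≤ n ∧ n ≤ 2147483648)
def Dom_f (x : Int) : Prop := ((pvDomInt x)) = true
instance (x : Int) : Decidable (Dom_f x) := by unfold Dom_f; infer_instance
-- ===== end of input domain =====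

-- B replaces A's digit-length loop by the closed form d*(x+1) - (10^d - 1)//9 (repunit identity); objective: simpler.

-- ===== PORT A =====
def f (x : Int) : Int :=
  let d : Int := PySem.Str.len (PySem.Int.toStr x)
  let st := (PySem.List.pyRange 1 d 1).foldl
      (fun (p : Int × Int) i => (p.1 + i * p.2, p.2 * 10)) (0, 9)
  st.1 + d * (x - 10 ^ (d - 1).toNat + 1)

-- ===== PORT B =====
def f_alt (x : Int) : Int :=
  let d : Int := PySem.Str.len (PySem.Int.toStr x)
  d * (x + 1) - PySem.Int.floordiv (10 ^ d.toNat - 1) 9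

-- ===== PRECONDITION & SPEC =====
def Spec_f (x : Int) (out : Int) : Prop := out = f_alt x
instance (x : Int) (out : Int) : Decidable (Spec_f x out) := by unfold Spec_f; infer_instance

-- ===== CLAIM (what is proved, stated in full; the proofs are below) =====
def Claim_equal_f : Prop := ∀ (x : Int), Dom_f x → Spec_f x (f x)

-- ===== LEMMAS AND PROOFS =====

-- repunit: rep n = (10^n - 1)/9
def rep : Nat → Int
  | 0 => 0
  | n + 1 => 10 * rep n + 1

theorem nine_mul_rep (n : Nat) : 9 * rep n + 1 = 10 ^ n := by
  induction n with
  | zero => simp [rep]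
  | succ n ih => simp [rep, pow_succ]; ring_nf; ring_nf at ih; omega

theorem loop_closed (n : Nat) :
    ((PySem.List.pyRange 1 ((n : Int) + 1) 1).foldl
      (fun (p : Int × Int) i => (p.1 + i * p.2, p.2 * 10)) (0, 9)) =
    (((n : Int) + 1) * 10 ^ n - rep (n + 1), 9 * 10 ^ n) := by
  induction n with
  | zero => simp [PySem.List.pyRange_one_eq_nil, rep]
  | succ n ih =>
    have hcast : ((n + 1 : Nat) : Int) + 1 = ((n : Int) + 1) + 1 := by push_cast; ring
    rw [hcast, PySem.List.pyRange_one_succ_right (by omega), List.foldl_append, ih]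
    simp only [List.foldl_cons, List.foldl_nil, Prod.mk.injEq]
    constructor
    · show ((n : Int) + 1) * 10 ^ n - rep (n + 1) + ((n : Int) + 1) * (9 * 10 ^ n)
        = (((n + 1 : Nat) : Int) + 1) * 10 ^ (n + 1) - rep (n + 1 + 1)
      push_cast
      have hr : rep (n + 1 + 1) = 10 * rep (n + 1) + 1 := rfl
      linear_combination hr + nine_mul_rep (n + 1)
    · rw [pow_succ]; ring

theorem floordiv_rep (n : Nat) :
    PySem.Int.floordiv (10 ^ n - 1) 9 = rep n := by
  rw [PySem.Int.floordiv_eq_ediv_of_pos (by norm_num)]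
  have h := nine_mul_rep n
  have : (10 : Int) ^ n - 1 = 9 * rep n := by omega
  rw [this, Int.mul_ediv_cancel_left _ (by norm_num)]

-- ===== VERDICT (by name: the statement is the Claim_ definition above) =====
theorem f_spec : Claim_equal_f := by
  intro x _
  unfold Spec_f
  simp only [f, f_alt]
  obtain ⟨n, hn⟩ := Int.eq_ofNat_of_zero_le
    (show (0:Int) ≤ PySem.Str.len (PySem.Int.toStr x) by simp [PySem.Str.len_eq])
  rw [hn]
  cases n with
  | zero => simp [PySem.List.pyRange_one_eq_nil, PySem.Int.floordiv]
  | succ m =>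
    have h1 : ((m + 1 : Nat) : Int) = ((m : Int) + 1) := by push_cast; ring
    have h2 : (((m : Int) + 1) - 1).toNat = m := by omega
    have h3 : ((m : Int) + 1).toNat = m + 1 := by omega
    rw [h1, loop_closed m, h2, h3, floordiv_rep (m + 1)]
    simp only []
    ring
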